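-- pv_equiv track=rewrite | github.com/rdoku/governed-rank | src/mosaic/isotonic_projection.py | _identify_runs
-- ===== SOURCE A (Python) =====
-- from typing import Dict, List, Tuple, Optional
--
-- def _identify_runs(n: int, protected_edges: set) -> List[Tuple[int, int]]:
--     """
--     Identify runs of consecutive protected edges.
--
--     A "run" is a maximal sequence of items where all intermediate edges
--     are protected. Unprotected edges break runs.
--
--     Args:
--         n: Total number of items
--         protected_edges: Set of protected edge indices
--
--     Returns:
--         List of (start_idx, end_idx) tuples for each run
--     """
--     if n <= 1:
--         return []
--
--     runs = []
--     run_start = None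
--
--     for k in range(n - 1):
--         if k in protected_edges:
--             if run_start is None:
--                 run_start = k
--         else:
--             if run_start is not None:
--                 # End of run (includes item at k)
--                 runs.append((run_start, k))
--                 run_start = None
--
--     # Handle run that extends to the end
--     if run_start is not None:
--         runs.append((run_start, n - 1))
--
--     return runs
-- ===== SOURCE B (Python) =====
-- from typing import List, Tuple
--
--
-- def _identify_runs(n: int, protected_edges: set) -> List[Tuple[int, int]]:
--     """Sort the relevant protected edges and group consecutive integers into runs.
--
--     Work is O(m log m) in m = len(protected_edges), independent of the scan range."""
--     if n <= 1:
--         return []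
--     ks = sorted({k for k in protected_edges if 0 <= k <= n - 2})
--     runs = []
--     i = 0
--     while i < len(ks):
--         start = ks[i]
--         while i + 1 < len(ks) and ks[i + 1] == ks[i] + 1:
--             i += 1
--         runs.append((start, ks[i] + 1))
--         i += 1
--     return runs
-- ===== Notes on version B (the rewrite author's own statement) =====
-- stated objective: alternative
-- what changed: Instead of scanning every edge index 0..n-2 with a run_start state machine, B sorts the protected edges restricted to [0, n-2] and groups consecutive integers into runs; it trades A's O(n) scan for O(m log m) work in m = |protected_edges|, which wins only when the protected set is sparse.
import Mathlib
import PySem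

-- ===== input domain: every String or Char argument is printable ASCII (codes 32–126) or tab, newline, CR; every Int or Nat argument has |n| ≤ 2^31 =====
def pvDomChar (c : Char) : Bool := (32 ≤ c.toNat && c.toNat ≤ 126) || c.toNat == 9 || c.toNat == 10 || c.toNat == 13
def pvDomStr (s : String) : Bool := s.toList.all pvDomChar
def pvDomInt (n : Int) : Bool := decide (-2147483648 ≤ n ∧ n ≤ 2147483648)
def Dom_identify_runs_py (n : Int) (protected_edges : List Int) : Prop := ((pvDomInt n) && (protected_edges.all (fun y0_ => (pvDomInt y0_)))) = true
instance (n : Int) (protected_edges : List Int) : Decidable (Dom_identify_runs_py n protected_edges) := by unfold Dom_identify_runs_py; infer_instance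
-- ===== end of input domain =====

-- B replaces A's scan of every edge index in [0, n-2] by sorting the protected
-- edges restricted to [0, n-2] and grouping consecutive integers into runs
-- (alternative algorithm: work depends on the protected set, not on n).

-- ===== PORT A =====
-- loop body of A's 'for k in range(n - 1)': state = (runs, run_start)
def stepA (protected_edges : List Int) (st : List (Int × Int) × Option Int) (k : Int) :
    List (Int × Int) × Option Int :=
  if protected_edges.contains k then
    match st.2 with
    | none => (st.1, some k)
    | some _ => st
  else
    match st.2 with
    | some s => (st.1 ++ [(s, k)], none)
    | none => st

def identify_runs_py (n : Int) (protected_edges : List Int) : List (Int × Int) :=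
  if n ≤ 1 then []
  else
    let st := (PySem.List.pyRange 0 (n - 1) 1).foldl (stepA protected_edges) ([], none)
    match st.2 with
    | some s => st.1 ++ [(s, n - 1)]
    | none => st.1

-- ===== PORT B =====
-- the grouping loop of Source B: 'start' = s, current 'ks[i]' = cur, remaining elements = list arg
def groupRuns (s cur : Int) : List Int → List (Int × Int)
  | [] => [(s, cur + 1)]
  | y :: ys => if y = cur + 1 then groupRuns s y ys else (s, cur + 1) :: groupRuns y y ys

def identify_runs_py_alt (n : Int) (protected_edges : List Int) : List (Int × Int) :=
  if n ≤ 1 then []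
  else
    match PySem.List.sorted
        (PySem.Set.ofList (protected_edges.filter (fun k => decide (0 ≤ k ∧ k ≤ n - 2))))
        (fun x => x) false with
    | [] => []
    | x :: xs => groupRuns x x xs

-- ===== PRECONDITION & SPEC =====
def Spec_identify_runs_py (n : Int) (protected_edges : List Int) (out : List (Int × Int)) : Prop := out = identify_runs_py_alt n protected_edges
instance (n : Int) (protected_edges : List Int) (out : List (Int × Int)) : Decidable (Spec_identify_runs_py n protected_edges out) := by unfold Spec_identify_runs_py; infer_instance

-- ===== CLAIM (what is proved, stated in full; the proofs are below) =====
def Claim_equal_identify_runs_py : Prop := ∀ (n : Int) (protected_edges : List Int), Dom_identify_runs_py n protected_edges → Spec_identify_runs_py n protected_edges (identify_runs_py n protected_edges)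

-- ===== LEMMAS AND PROOFS =====

-- A's final handling of a run that extends to the end of the range
def finishA (st : List (Int × Int) × Option Int) (m : Int) : List (Int × Int) :=
  match st.2 with
  | some s => st.1 ++ [(s, m)]
  | none => st.1

-- grouping as seen from A's loop state: none = not inside a run, some s = run started at s
def groupSt : Option Int → Int → List Int → List (Int × Int)
  | some s, cur, l => groupRuns s cur l
  | none, _, [] => []
  | none, _, x :: xs => groupRuns x x xs

lemma groupRuns_cons (s cur y : Int) (ys : List Int) :
    groupRuns s cur (y :: ys) = if y = cur + 1 then groupRuns s y ys else (s, cur + 1) :: groupRuns y y ys := rfl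

-- the central loop invariant: running A's scan over [i, m) from state (acc, o) and
-- finishing at m appends to acc the grouped runs of the protected members of [i, m)
lemma runsLoop (pe : List Int) (m : Int) :
    ∀ (d : Nat) (i : Int), i ≤ m → (m - i).toNat = d →
    ∀ (acc : List (Int × Int)) (o : Option Int),
      finishA ((PySem.List.pyRange i m 1).foldl (stepA pe) (acc, o)) m
        = acc ++ groupSt o (i - 1) ((PySem.List.pyRange i m 1).filter (fun k => pe.contains k)) := by
  intro d
  induction d with
  | zero =>
      intro i hle hd acc o
      have him : i = m := by omega
      subst him
      rw [PySem.List.pyRange_one_eq_nil le_rfl]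
      cases o with
      | none => simp [finishA, groupSt]
      | some s =>
          simp only [List.filter_nil, List.foldl_nil, finishA, groupSt, groupRuns]
          rw [show i - 1 + 1 = i from by omega]
  | succ d ih =>
      intro i hle hd acc o
      have hlt : i < m := by omega
      rw [PySem.List.pyRange_one_cons hlt]
      have hbound : ∀ y ∈ (PySem.List.pyRange (i+1) m 1).filter (fun k => pe.contains k), i + 1 ≤ y := by
        intro y hy
        exact (PySem.List.mem_pyRange_one.mp (List.mem_of_mem_filter hy)).1
      have e1 : i + 1 - 1 = i := by omega
      simp only [List.foldl_cons, List.filter_cons]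
      by_cases hc : pe.contains i
      · have hmem : i ∈ pe := by simpa using hc
        simp only [hc, if_pos]
        cases o with
        | none =>
            rw [show stepA pe (acc, none) i = (acc, some i) by simp [stepA, hmem]]
            rw [ih (i+1) (by omega) (by omega) acc (some i), e1]
            rfl
        | some s =>
            rw [show stepA pe (acc, some s) i = (acc, some s) by simp [stepA, hmem]]
            rw [ih (i+1) (by omega) (by omega) acc (some s), e1]
            show acc ++ groupRuns s i _ = acc ++ groupRuns s (i - 1) (i :: _)
            rw [groupRuns_cons, if_pos (by omega : i = i - 1 + 1)]
      · have hmem : i ∉ pe := by simpa using hc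
        simp only [hc, Bool.false_eq_true, if_false]
        cases o with
        | none =>
            rw [show stepA pe (acc, none) i = (acc, none) by simp [stepA, hmem]]
            rw [ih (i+1) (by omega) (by omega) acc none]
            cases (PySem.List.pyRange (i+1) m 1).filter (fun k => pe.contains k) with
            | nil => rfl
            | cons y ys => rfl
        | some s =>
            rw [show stepA pe (acc, some s) i = (acc ++ [(s, i)], none) by simp [stepA, hmem]]
            rw [ih (i+1) (by omega) (by omega) (acc ++ [(s, i)]) none]
            cases hr : (PySem.List.pyRange (i+1) m 1).filter (fun k => pe.contains k) with
            | nil =>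
                show acc ++ [(s, i)] ++ [] = acc ++ [(s, i - 1 + 1)]
                rw [show i - 1 + 1 = i from by omega, List.append_nil]
            | cons y ys =>
                have hy : i + 1 ≤ y := hbound y (by rw [hr]; exact List.mem_cons_self)
                show acc ++ [(s, i)] ++ groupRuns y y ys = acc ++ groupRuns s (i - 1) (y :: ys)
                rw [groupRuns_cons, if_neg (by omega : ¬ y = i - 1 + 1),
                  show i - 1 + 1 = i from by omega, List.append_assoc, List.singleton_append]

-- B's sorted deduplicated member list IS the increasing filter of A's range
lemma sorted_members (n : Int) (pe : List Int) :
    PySem.List.sorted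
        (PySem.Set.ofList (pe.filter (fun k => decide (0 ≤ k ∧ k ≤ n - 2))))
        (fun x => x) false
      = (PySem.List.pyRange 0 (n-1) 1).filter (fun k => pe.contains k) := by
  apply PySem.List.sorted_eq_of_perm_of_pairwise_lt
  · rw [List.perm_ext_iff_of_nodup
      (List.Nodup.filter _ (PySem.List.nodup_pyRange_one 0 (n-1)))
      (PySem.Set.nodup_ofList _)]
    intro a
    simp only [List.mem_filter, PySem.List.mem_pyRange_one, PySem.Set.mem_ofList,
      List.contains_iff_mem, decide_eq_true_eq]
    constructor
    · rintro ⟨⟨h0, h1⟩, hmem⟩; exact ⟨hmem, h0, by omega⟩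
    · rintro ⟨hmem, h0, h1⟩; exact ⟨⟨h0, by omega⟩, hmem⟩
  · exact List.Pairwise.sublist List.filter_sublist (PySem.List.pairwise_lt_pyRange_one 0 (n-1))

-- ===== VERDICT (by name: the statement is the Claim_ definition above) =====
theorem identify_runs_py_spec : Claim_equal_identify_runs_py := by
  intro n pe _
  unfold Spec_identify_runs_py identify_runs_py identify_runs_py_alt
  by_cases hn : n ≤ 1
  · simp [hn]
  · simp only [if_neg hn]
    rw [sorted_members n pe]
    have h := runsLoop pe (n-1) (n-1-0).toNat 0 (by omega) rfl [] none
    simp only [List.nil_append] at h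
    calc (match ((PySem.List.pyRange 0 (n - 1) 1).foldl (stepA pe) ([], none)).2 with
          | some s => ((PySem.List.pyRange 0 (n - 1) 1).foldl (stepA pe) ([], none)).1 ++ [(s, n - 1)]
          | none => ((PySem.List.pyRange 0 (n - 1) 1).foldl (stepA pe) ([], none)).1)
        = finishA ((PySem.List.pyRange 0 (n - 1) 1).foldl (stepA pe) ([], none)) (n-1) := rfl
      _ = groupSt none (0 - 1) ((PySem.List.pyRange 0 (n-1) 1).filter (fun k => pe.contains k)) := h
      _ = _ := by
          cases (PySem.List.pyRange 0 (n-1) 1).filter (fun k => pe.contains k) with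
          | nil => rfl
          | cons y ys => rfl
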